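-- pv_equiv track=rewrite | github.com/KacukVA/hyperskill_easy_rider_bus_company | Easy Rider Bus Company/task/easyrider/easyrider.py | get_bus_line_info
-- ===== SOURCE A (Python) =====
-- def get_bus_line_info(data) -> dict:
--     buses_lines_info = {}
--     for _ in data:
--         if buses_lines_info.get(_['bus_id']):
--             buses_lines_info[_['bus_id']] += 1
--         else:
--             buses_lines_info[_['bus_id']] = 1
--     return buses_lines_info
-- ===== SOURCE B (Python) =====
-- def get_bus_line_info(data) -> dict:
--     ids = [d['bus_id'] for d in data]
--     return {b: ids.count(b) for b in dict.fromkeys(ids)}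
-- ===== Notes on version B (the rewrite author's own statement) =====
-- stated objective: alternative
-- what changed: Replaces the single accumulating dict pass (lookup-or-initialise per row) by a two-phase computation: collect all bus_ids, then build the result by counting each distinct id with list.count over the collected list.
import Mathlib
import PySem

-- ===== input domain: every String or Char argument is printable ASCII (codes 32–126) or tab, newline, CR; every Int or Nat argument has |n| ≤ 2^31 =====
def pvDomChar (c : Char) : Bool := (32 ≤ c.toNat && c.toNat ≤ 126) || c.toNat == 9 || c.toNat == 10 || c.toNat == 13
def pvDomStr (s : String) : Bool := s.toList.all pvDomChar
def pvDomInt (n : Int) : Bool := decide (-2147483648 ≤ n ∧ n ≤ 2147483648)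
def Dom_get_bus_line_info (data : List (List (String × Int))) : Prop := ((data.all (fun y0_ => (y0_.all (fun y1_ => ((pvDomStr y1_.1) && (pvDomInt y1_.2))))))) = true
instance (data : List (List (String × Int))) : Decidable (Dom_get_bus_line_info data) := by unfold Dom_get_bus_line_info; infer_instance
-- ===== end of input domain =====

-- B replaces A's single accumulating dict pass by a two-phase computation (collect
-- every bus_id, then count each distinct id over that list); same result, not faster.

-- ===== PORT A =====
-- _['bus_id'] on a row (Pre_ guarantees the key is present, so the default 0 is never used)
def pvRowBusId (row : List (String × Int)) : Int :=
  (PySem.Dict.mk row).getD "bus_id" 0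

def get_bus_line_info (data : List (List (String × Int))) : List (Int × Int) :=
  (data.foldl (fun d row =>
    -- if buses_lines_info.get(b):  (truthy iff present with a nonzero count)
    if (d.get? (pvRowBusId row)).getD 0 ≠ 0 then
      d.insert (pvRowBusId row) ((d.get? (pvRowBusId row)).getD 0 + 1)
    else d.insert (pvRowBusId row) 1) PySem.Dict.empty).items

-- ===== PORT B =====
def get_bus_line_info_alt (data : List (List (String × Int))) : List (Int × Int) :=
  let ids := data.map pvRowBusId
  ((PySem.List.dedup ids).foldl (fun d b => d.insert b (ids.count b : Int))
    PySem.Dict.empty).items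

-- ===== PRECONDITION & SPEC =====
-- Pre_ excludes exactly the inputs where some row lacks the key "bus_id": A raises KeyError there.
def Pre_get_bus_line_info (data : List (List (String × Int))) : Prop :=
  ∀ row ∈ data, (PySem.Dict.mk row).contains "bus_id" = true
instance (data : List (List (String × Int))) : Decidable (Pre_get_bus_line_info data) := by
  unfold Pre_get_bus_line_info; infer_instance

def pvWitness_get_bus_line_info : (List (List (String × Int))) :=
  [[("bus_id", 128)], [("bus_id", 128)], [("bus_id", 512)]]

def Spec_get_bus_line_info (data : List (List (String × Int))) (out : List (Int × Int)) : Prop := out = get_bus_line_info_alt data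
instance (data : List (List (String × Int))) (out : List (Int × Int)) : Decidable (Spec_get_bus_line_info data out) := by unfold Spec_get_bus_line_info; infer_instance

-- ===== CLAIM (what is proved, stated in full; the proofs are below) =====
def Claim_equal_get_bus_line_info : Prop := ∀ (data : List (List (String × Int))), Dom_get_bus_line_info data → Pre_get_bus_line_info data → Spec_get_bus_line_info data (get_bus_line_info data)

-- ===== LEMMAS AND PROOFS =====

-- A's loop body is exactly the standard counting step 'd[b] = d.get(b, 0) + 1'
-- (when the looked-up value is 0 or absent, inserting 1 is inserting 0 + 1),
-- so A's fold over the rows is the counter of the projected bus_ids.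
lemma stepA_eq (d : PySem.Dict Int Int) (b : Int) :
    (if (d.get? b).getD 0 ≠ 0 then d.insert b ((d.get? b).getD 0 + 1)
     else d.insert b 1)
    = d.insert b (d.getD b 0 + 1) := by
  rw [← PySem.Dict.getD_eq_get?_getD]
  by_cases h : d.getD b 0 = 0 <;> simp [h]

lemma foldA_map (data : List (List (String × Int))) :
    ∀ d : PySem.Dict Int Int,
    data.foldl (fun d row =>
      if (d.get? (pvRowBusId row)).getD 0 ≠ 0 then
        d.insert (pvRowBusId row) ((d.get? (pvRowBusId row)).getD 0 + 1)
      else d.insert (pvRowBusId row) 1) d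
    = (data.map pvRowBusId).foldl (fun d x => d.insert x (d.getD x 0 + 1)) d := by
  induction data with
  | nil => intro d; rfl
  | cons r rs ih =>
    intro d
    simp only [List.foldl_cons, List.map_cons]
    rw [stepA_eq]
    exact ih _

lemma foldA_counter (data : List (List (String × Int))) :
    data.foldl (fun d row =>
      if (d.get? (pvRowBusId row)).getD 0 ≠ 0 then
        d.insert (pvRowBusId row) ((d.get? (pvRowBusId row)).getD 0 + 1)
      else d.insert (pvRowBusId row) 1) PySem.Dict.empty
    = PySem.Dict.counter (data.map pvRowBusId) :=
  (foldA_map data PySem.Dict.empty).trans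
    (PySem.Dict.foldl_insert_getD_add_one_eq_counter _)

-- ===== VERDICT (by name: the statement is the Claim_ definition above) =====
theorem get_bus_line_info_spec : Claim_equal_get_bus_line_info := by
  intro data _ _
  unfold Spec_get_bus_line_info get_bus_line_info get_bus_line_info_alt
  refine (congrArg PySem.Dict.items (foldA_counter data)).trans ?_
  have hB : ((PySem.List.dedup (data.map pvRowBusId)).foldl
        (fun d b => d.insert b (((data.map pvRowBusId).count b : Int)))
        PySem.Dict.empty).items
      = PySem.Dict.empty.items
        ++ (PySem.List.dedup (data.map pvRowBusId)).map
            (fun b => (b, ((data.map pvRowBusId).count b : Int))) :=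
    PySem.Dict.items_foldl_insert_fresh (PySem.List.dedup (data.map pvRowBusId))
      (fun b => b) (fun b => (((data.map pvRowBusId).count b : Int)))
      PySem.Dict.empty (fun a _ => rfl)
      (by simp)
  rw [PySem.Dict.items_counter]
  refine Eq.symm (hB.trans ?_)
  simp [PySem.Dict.empty]
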